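-- pv_equiv track=rewrite | github.com/josojo/lean_ai_helper | src/mwe.py | all_brackets_closed
-- ===== SOURCE A (Python) =====
-- def all_brackets_closed(code: str) -> bool:
--     opening_parenthesis = ["(", "{", "[", "\u27e8"]
--     closing_parenthesis = [")", "}", "]", "\u27e9"]
--     # iterate over the index of the commands
--     for opening, closing in zip(opening_parenthesis, closing_parenthesis):
--         # count the number of opening and closing parenthesis
--         num_opening = code.count(opening)
--         num_closing = code.count(closing)
--         if num_opening > num_closing:
--             return False
--     return True
-- ===== SOURCE B (Python) =====
-- def all_brackets_closed(code: str) -> bool: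
--     # Single pass with a running signed balance per bracket type:
--     # +1 on an opener, -1 on its closer; at the end every balance must be <= 0.
--     # Correct because A's test count(open) > count(close) is exactly balance > 0.
--     p = c = s = a = 0
--     for ch in code:
--         if ch == "(":
--             p += 1
--         elif ch == ")":
--             p -= 1
--         elif ch == "{":
--             c += 1
--         elif ch == "}":
--             c -= 1
--         elif ch == "[":
--             s += 1
--         elif ch == "]":
--             s -= 1
--         elif ch == "\u27e8":
--             a += 1
--         elif ch == "\u27e9":
--             a -= 1
--     return p <= 0 and c <= 0 and s <= 0 and a <= 0
-- ===== Notes on version B (the rewrite author's own statement) =====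
-- stated objective: alternative
-- what changed: A scans the whole string twice per bracket pair with str.count and early-returns; B makes one pass over the characters maintaining a signed running balance (+1 opener, -1 closer) per bracket type and checks at the end that every balance is non-positive.
import Mathlib
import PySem

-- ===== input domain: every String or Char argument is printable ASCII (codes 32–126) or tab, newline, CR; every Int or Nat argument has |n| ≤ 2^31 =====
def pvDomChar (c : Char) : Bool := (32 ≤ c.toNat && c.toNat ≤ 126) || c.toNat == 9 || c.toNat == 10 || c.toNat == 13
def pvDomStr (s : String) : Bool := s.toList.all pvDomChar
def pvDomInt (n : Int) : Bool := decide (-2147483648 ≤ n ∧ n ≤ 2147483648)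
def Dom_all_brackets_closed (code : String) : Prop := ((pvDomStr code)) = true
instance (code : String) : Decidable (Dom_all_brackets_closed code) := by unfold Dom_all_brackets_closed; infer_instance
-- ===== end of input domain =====

-- B replaces A's two str.count scans per bracket pair (early-return loop) with a single
-- character pass keeping a signed running balance per bracket type; return value only.

-- ===== PORT A =====
-- the 'for opening, closing in zip(...)' loop with its early 'return False'
def abcPairLoop (code : String) : List (String × String) → Bool
  | [] => true
  | (opening, closing) :: rest =>
    let num_opening := PySem.Str.count code opening
    let num_closing := PySem.Str.count code closing
    if num_opening > num_closing then false else abcPairLoop code rest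

def all_brackets_closed (code : String) : Bool :=
  let opening_parenthesis := ["(", "{", "[", "⟨"]
  let closing_parenthesis := [")", "}", "]", "⟩"]
  abcPairLoop code (List.zip opening_parenthesis closing_parenthesis)

-- ===== PORT B =====
-- the body of B's 'for ch in code' loop: the if/elif chain updating (p, c, s, a)
def abcStep (st : Int × Int × Int × Int) (ch : Char) : Int × Int × Int × Int :=
  let (p, c, s, a) := st
  if ch = '(' then (p + 1, c, s, a)
  else if ch = ')' then (p - 1, c, s, a)
  else if ch = '{' then (p, c + 1, s, a)
  else if ch = '}' then (p, c - 1, s, a)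
  else if ch = '[' then (p, c, s + 1, a)
  else if ch = ']' then (p, c, s - 1, a)
  else if ch = '⟨' then (p, c, s, a + 1)
  else if ch = '⟩' then (p, c, s, a - 1)
  else (p, c, s, a)

def all_brackets_closed_alt (code : String) : Bool :=
  let st := code.toList.foldl abcStep (0, 0, 0, 0)
  st.1 ≤ 0 && st.2.1 ≤ 0 && st.2.2.1 ≤ 0 && st.2.2.2 ≤ 0

-- ===== PRECONDITION & SPEC =====
def Spec_all_brackets_closed (code : String) (out : Bool) : Prop := out = all_brackets_closed_alt code
instance (code : String) (out : Bool) : Decidable (Spec_all_brackets_closed code out) := by unfold Spec_all_brackets_closed; infer_instance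

-- ===== CLAIM (what is proved, stated in full; the proofs are below) =====
def Claim_equal_all_brackets_closed : Prop := ∀ (code : String), Dom_all_brackets_closed code → Spec_all_brackets_closed code (all_brackets_closed code)

-- ===== LEMMAS AND PROOFS =====

-- Chars.count of a single-character needle is List.count (the fuel `n` bounds the scan)
theorem abc_go_single (c : Char) (l : List Char) (n acc : Nat) (h : l.length ≤ n) :
    PySem.Chars.count.go [c] n l acc = acc + l.count c := by
  induction l generalizing n acc with
  | nil => cases n <;> simp [PySem.Chars.count.go]
  | cons x xs ih =>
    cases n with
    | zero => simp at h
    | succ m =>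
      rw [PySem.Chars.count.go.eq_def]
      simp only [List.length_cons, Nat.add_le_add_iff_right] at h
      by_cases hc : c = x
      · subst hc
        simp [ih _ _ h]
        omega
      · simp [List.cons_prefix_cons, Ne.symm hc, hc, ih _ _ h]

theorem abc_count_single (s : List Char) (c : Char) :
    PySem.Chars.count s [c] = s.count c := by
  rw [PySem.Chars.count]
  cases s with
  | nil => rfl
  | cons x xs =>
    simp only [List.isEmpty_cons, List.length_cons]
    rw [abc_go_single c (x :: xs) (xs.length + 1) 0 (by simp)]
    simp

theorem abc_str_count_single (s : String) (c : Char) :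
    PySem.Str.count s (String.ofList [c]) = s.toList.count c := by
  simp [pysem, abc_count_single]

-- one step of the balance fold, written as unconditional arithmetic
theorem abc_step_eq (p c s a : Int) (ch : Char) :
    abcStep (p, c, s, a) ch =
      (p + (if ch = '(' then 1 else 0) - (if ch = ')' then 1 else 0),
       c + (if ch = '{' then 1 else 0) - (if ch = '}' then 1 else 0),
       s + (if ch = '[' then 1 else 0) - (if ch = ']' then 1 else 0),
       a + (if ch = '⟨' then 1 else 0) - (if ch = '⟩' then 1 else 0)) := by
  unfold abcStep
  split_ifs <;> subst_vars <;> simp_all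

-- the balance fold computes, in each component, opener count minus closer count
theorem abc_fold_balance (l : List Char) (p c s a : Int) :
    l.foldl abcStep (p, c, s, a) =
      (p + l.count '(' - l.count ')', c + l.count '{' - l.count '}',
       s + l.count '[' - l.count ']', a + l.count '⟨' - l.count '⟩') := by
  induction l generalizing p c s a with
  | nil => simp
  | cons x xs ih =>
    rw [List.foldl_cons, abc_step_eq, ih]
    simp only [List.count_cons, beq_iff_eq, Prod.mk.injEq]
    refine ⟨?_, ?_, ?_, ?_⟩ <;> split_ifs <;> simp_all <;> omega

-- ===== VERDICT (by name: the statement is the Claim_ definition above) =====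
theorem all_brackets_closed_spec : Claim_equal_all_brackets_closed := by
  intro code _
  unfold Spec_all_brackets_closed all_brackets_closed all_brackets_closed_alt
  simp only [List.zip, List.zipWith, abcPairLoop, abc_fold_balance]
  simp only [show ("(" : String) = String.ofList ['('] from rfl,
             show (")" : String) = String.ofList [')'] from rfl,
             show ("{" : String) = String.ofList ['{'] from rfl,
             show ("}" : String) = String.ofList ['}'] from rfl,
             show ("[" : String) = String.ofList ['['] from rfl,
             show ("]" : String) = String.ofList [']'] from rfl,
             show ("⟨" : String) = String.ofList ['⟨'] from rfl,
             show ("⟩" : String) = String.ofList ['⟩'] from rfl,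
             abc_str_count_single]
  split_ifs <;> simp <;> omega
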